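-- pv_equiv track=rewrite | github.com/veeresh-code24/ARRAY-DSA | maximum_consecutive.py | maximum_consective
-- ===== SOURCE A (Python) =====
-- def maximum_consective(nums):
--     n = len(nums)
--     max_len = 0
--     count = 0
--
--     for i in range(n):
--         if nums[i] == 1:
--             count += 1
--
--             max_len = max(max_len,count)
--
--         else:
--             count = 0
--
--     return max_len
-- ===== SOURCE B (Python) =====
-- def maximum_consective(nums):
--     # Two-pointer run scan: find each maximal run of equal elements at once,
--     # keep the longest run of 1s.
--     best = 0
--     i = 0
--     n = len(nums)
--     while i < n:
--         j = i
--         while j < n and nums[j] == nums[i]: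
--             j += 1
--         if nums[i] == 1 and j - i > best:
--             best = j - i
--         i = j
--     return best
-- ===== Notes on version B (the rewrite author's own statement) =====
-- stated objective: alternative
-- what changed: B partitions the array into maximal runs of equal elements with a two-pointer scan and takes the longest run of 1s, instead of threading a running count and running max through a flat per-element loop.
import Mathlib
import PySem

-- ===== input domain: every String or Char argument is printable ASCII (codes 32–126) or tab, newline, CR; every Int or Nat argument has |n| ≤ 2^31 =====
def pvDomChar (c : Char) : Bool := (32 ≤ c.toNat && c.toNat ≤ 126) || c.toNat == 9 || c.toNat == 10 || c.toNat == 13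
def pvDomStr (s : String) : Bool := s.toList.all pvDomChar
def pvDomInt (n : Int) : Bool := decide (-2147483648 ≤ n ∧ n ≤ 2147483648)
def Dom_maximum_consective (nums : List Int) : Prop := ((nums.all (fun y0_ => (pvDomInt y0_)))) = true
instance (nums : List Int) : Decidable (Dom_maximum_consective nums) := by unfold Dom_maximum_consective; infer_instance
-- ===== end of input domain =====

-- B replaces A's flat loop (running count + running max) by a two-pointer run
-- scan over maximal runs of equal elements; alternative decomposition, same cost.


-- ===== PORT A =====
-- for i in range(n): thread (max_len, count) through the elements in order
def maximum_consective (nums : List Int) : Int :=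
  (nums.foldl (fun (s : Int × Int) x =>
    if x = 1 then (max s.1 (s.2 + 1), s.2 + 1) else (s.1, 0)) (0, 0)).1

-- ===== PORT B =====
-- inner while loop: length of the maximal leading run of x, and the remainder
def takeRun (x : Int) : List Int → Int × List Int
  | [] => (0, [])
  | y :: ys =>
    if y = x then
      let p := takeRun x ys
      (p.1 + 1, p.2)
    else (0, y :: ys)

theorem takeRun_len (x : Int) (xs : List Int) : (takeRun x xs).2.length ≤ xs.length := by
  induction xs with
  | nil => simp [takeRun]
  | cons y ys ih =>
    simp only [takeRun]
    split
    · exact Nat.le_succ_of_le ih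
    · simp

-- outer while loop: advance run by run, keep the best run of 1s
def maximum_consective_alt (nums : List Int) : Int :=
  match nums with
  | [] => 0
  | x :: xs =>
    let p := takeRun x xs
    let run := p.1 + 1
    max (if x = 1 then run else 0) (maximum_consective_alt p.2)
termination_by nums.length
decreasing_by
  simpa using Nat.lt_succ_of_le (takeRun_len x xs)

-- ===== PRECONDITION & SPEC =====
def Spec_maximum_consective (nums : List Int) (out : Int) : Prop := out = maximum_consective_alt nums
instance (nums : List Int) (out : Int) : Decidable (Spec_maximum_consective nums out) := by unfold Spec_maximum_consective; infer_instance

-- ===== CLAIM (what is proved, stated in full; the proofs are below) =====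
def Claim_equal_maximum_consective : Prop := ∀ (nums : List Int), Dom_maximum_consective nums → Spec_maximum_consective nums (maximum_consective nums)

-- ===== LEMMAS AND PROOFS =====

-- reference function: best run of 1s given a current run of length c
def bestFrom (c : Int) : List Int → Int
  | [] => c
  | x :: xs => if x = 1 then bestFrom (c + 1) xs else max c (bestFrom 0 xs)

theorem bestFrom_ge (xs : List Int) : ∀ c, c ≤ bestFrom c xs := by
  induction xs with
  | nil => intro c; simp [bestFrom]
  | cons x xs ih =>
    intro c
    simp only [bestFrom]
    split
    · exact le_trans (by omega) (ih (c + 1))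
    · exact le_max_left _ _

theorem foldl_eq_bestFrom (xs : List Int) : ∀ m c : Int, 0 ≤ c → c ≤ m →
    (xs.foldl (fun (s : Int × Int) x =>
      if x = 1 then (max s.1 (s.2 + 1), s.2 + 1) else (s.1, 0)) (m, c)).1
    = max m (bestFrom c xs) := by
  induction xs with
  | nil =>
    intro m c _ h
    simp only [List.foldl, bestFrom, max_def]
    split_ifs <;> omega
  | cons x xs ih =>
    intro m c h0 h
    simp only [List.foldl, bestFrom]
    by_cases hx : x = 1
    · subst hx
      rw [if_pos rfl, if_pos rfl, ih (max m (c + 1)) (c + 1) (by omega) (le_max_right _ _)]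
      have := bestFrom_ge xs (c + 1)
      simp only [max_def]
      split_ifs <;> omega
    · rw [if_neg hx, if_neg hx, ih m 0 (by omega) (by omega)]
      have := bestFrom_ge xs (0 : Int)
      simp only [max_def]
      split_ifs <;> omega

theorem bestFrom_run_one (xs : List Int) : ∀ c : Int, 0 ≤ c →
    bestFrom c xs = max (c + (takeRun 1 xs).1) (bestFrom 0 (takeRun 1 xs).2) := by
  induction xs with
  | nil =>
    intro c h
    simp only [bestFrom, takeRun, max_def]
    split_ifs <;> omega
  | cons x xs ih =>
    intro c h
    simp only [bestFrom, takeRun]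
    by_cases hx : x = 1
    · subst hx
      rw [if_pos rfl, if_pos rfl, ih (c + 1) (by omega)]
      simp only [max_def]
      split_ifs <;> omega
    · rw [if_neg hx, if_neg hx]
      have h1 := bestFrom_ge xs (0 : Int)
      simp only [bestFrom, if_neg hx, max_def]
      split_ifs <;> omega

theorem bestFrom_zero_skip (x : Int) (hx : x ≠ 1) (xs : List Int) :
    max 0 (bestFrom 0 (takeRun x xs).2) = max 0 (bestFrom 0 xs) := by
  induction xs with
  | nil => simp [takeRun]
  | cons y ys ih =>
    simp only [takeRun]
    by_cases hy : y = x
    · subst hy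
      rw [if_pos rfl]
      simp only [bestFrom, if_neg hx]
      rw [ih]
      simp only [max_def]
      split_ifs <;> omega
    · rw [if_neg hy]

theorem alt_eq_bestFrom_aux : ∀ (n : Nat) (nums : List Int), nums.length ≤ n →
    maximum_consective_alt nums = bestFrom 0 nums := by
  intro n
  induction n with
  | zero =>
    intro nums h
    have hnil : nums = [] := List.eq_nil_of_length_eq_zero (Nat.le_zero.mp h)
    subst hnil
    simp [maximum_consective_alt, bestFrom]
  | succ n ih =>
    intro nums h
    match nums with
    | [] => simp [maximum_consective_alt, bestFrom]
    | x :: xs =>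
      simp only [maximum_consective_alt]
      by_cases hx : x = 1
      · subst hx
        rw [if_pos rfl, ih _ (le_trans (takeRun_len 1 xs) (by simpa using h))]
        have hb : bestFrom 0 (1 :: xs) = bestFrom 1 xs := by simp [bestFrom]
        rw [hb, bestFrom_run_one xs 1 (by omega)]
        simp only [max_def]
        split_ifs <;> omega
      · rw [if_neg hx, ih _ (le_trans (takeRun_len x xs) (by simpa using h))]
        rw [bestFrom_zero_skip x hx xs]
        simp [bestFrom, if_neg hx]

theorem alt_eq_bestFrom (nums : List Int) : maximum_consective_alt nums = bestFrom 0 nums :=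
  alt_eq_bestFrom_aux nums.length nums le_rfl

-- ===== VERDICT (by name: the statement is the Claim_ definition above) =====
theorem maximum_consective_spec : Claim_equal_maximum_consective := by
  intro nums _
  show maximum_consective nums = maximum_consective_alt nums
  rw [maximum_consective, foldl_eq_bestFrom nums 0 0 (by omega) (by omega), alt_eq_bestFrom]
  have := bestFrom_ge nums (0 : Int)
  simp only [max_def]
  split_ifs <;> omega
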